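-- pv_equiv track=rewrite | github.com/sunkyuj/ps | 프로그래머스/3/152995. 인사고과/인사고과.py | solution
-- ===== SOURCE A (Python) =====
-- import bisect
--
-- def solution(scores):
--     scores = list(map(tuple, scores))
--     me = scores[0]
--     answer = 0
--     # 어떤 사람이 둘다 낮은거 있으면 못받음
--
--     n = len(scores) # 10만
--     insen = [0]*n
--     scores.sort(key = lambda x: (x[0],-x[1])) # 근무평가 기준으로 정렬
--
--     rem = set()
--     prev_st = [(-1, 100001)]
--     for i in range(n):
--         a,b = scores[i] # a는 오름차순 고정, b는 내려가는것만 허용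
--         # 만약 b 올라갔다? 그놈 나가리임
--         while prev_st[-1][1] < b:
--             prev = prev_st.pop()
--             rem.add(prev)
--         prev_st.append(scores[i])
--
--     if me in rem:
--         return -1
--
--     insen = [sum(scores[i]) for i in range(n) if scores[i] not in rem]
--     insen.sort()
--     rank = bisect.bisect_right(insen, sum(me))
--     return len(insen) - rank + 1
-- ===== SOURCE B (Python) =====
-- def solution(scores):
--     ma, mb = scores[0]
--     me_sum = ma + mb
--     max_b = None
--     better = 0
--     me_dominated = False
--     for a, b in sorted(scores, key=lambda s: (-s[0], s[1])):
--         if max_b is not None and b < max_b: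
--             # dominated: someone already seen has a strictly higher first
--             # score (ties are ascending in b, so equals never trigger this)
--             # and a strictly higher second score
--             if a == ma and b == mb:
--                 me_dominated = True
--         else:
--             max_b = b
--             if a + b > me_sum:
--                 better += 1
--     return -1 if me_dominated else better + 1
-- ===== Notes on version B (the rewrite author's own statement) =====
-- stated objective: alternative
-- what changed: A sorts ascending by (score1, -score2) and maintains a monotonic stack with pops to collect dominated people into a set, then builds, sorts and bisects the list of survivor sums; B sorts descending by (-score1, score2), sweeps once with a single running maximum of the second score to detect domination, and counts survivors with a strictly larger sum directly, with no stack, no set, no second sort and no bisect.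
import Mathlib
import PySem

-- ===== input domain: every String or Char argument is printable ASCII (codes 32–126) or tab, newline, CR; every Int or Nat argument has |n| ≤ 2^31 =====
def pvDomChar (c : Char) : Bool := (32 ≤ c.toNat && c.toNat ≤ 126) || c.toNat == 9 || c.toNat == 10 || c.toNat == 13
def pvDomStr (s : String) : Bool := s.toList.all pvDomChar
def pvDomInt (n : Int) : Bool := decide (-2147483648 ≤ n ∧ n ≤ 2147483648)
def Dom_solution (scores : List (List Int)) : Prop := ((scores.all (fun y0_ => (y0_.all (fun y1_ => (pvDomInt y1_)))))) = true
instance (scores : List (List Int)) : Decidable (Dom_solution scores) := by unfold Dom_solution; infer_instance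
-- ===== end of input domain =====

-- B replaces A's ascending-sort monotonic-stack domination detection by a descending-sort
-- sweep with one running maximum, and counts strictly better survivors directly instead of
-- building, sorting and bisecting the list of survivor sums (objective: alternative).

-- ===== PORT A =====

-- rows have length 2 under Pre_solution; Python raises on any other shape (excluded by Pre_solution)
def pvPair (r : List Int) : Int × Int := match r with | [a, b] => (a, b) | _ => (0, 0)

-- 'while prev_st[-1][1] < b: prev = prev_st.pop(); rem.add(prev)' — the stack is held top-first;
-- the [] case is Python's IndexError on the emptied stack (outside Pre_solution it is never reached)
def pvPop (b : Int) : List (Int × Int) → PySem.Set (Int × Int) → List (Int × Int) × PySem.Set (Int × Int)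
  | [], rem => ([], rem)
  | t :: st, rem => if t.2 < b then pvPop b st (PySem.Set.add rem t) else (t :: st, rem)

def pvLoopA : List (Int × Int) → List (Int × Int) → PySem.Set (Int × Int) → PySem.Set (Int × Int)
  | [], _, rem => rem
  | p :: rest, st, rem =>
    let pr := pvPop p.2 st rem
    pvLoopA rest (p :: pr.1) pr.2

-- Python compares the key tuples (x[0], -x[1]) lexicographically: key into Lex (Int × Int).
-- bisect.bisect_right is ported as PySem.List.bisectRight.
def solution (scores : List (List Int)) : Int :=
  let sc := scores.map pvPair
  match sc with
  | [] => 0   -- 'me = scores[0]' raises IndexError on []: excluded by Pre_solution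
  | me :: _ =>
    let ss := PySem.List.sorted sc (fun x => toLex (x.1, -x.2))
    let rem := pvLoopA ss [(-1, 100001)] PySem.Set.empty
    if PySem.Set.contains rem me then (-1 : Int)
    else
      let insen := PySem.List.sorted ((ss.filter (fun t => !PySem.Set.contains rem t)).map (fun t => t.1 + t.2)) (fun x => x)
      (insen.length : Int) - (PySem.List.bisectRight insen (me.1 + me.2) : Int) + 1

-- ===== PORT B =====

-- the sweep of Source B: 'if max_b is not None and b < max_b: … else: max_b = b; …'
def pvLoopB (ma mb : Int) : List (Int × Int) → Option Int → Int → Bool → Int × Bool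
  | [], _, better, dom => (better, dom)
  | (a, b) :: rest, maxb, better, dom =>
    match maxb with
    | some m =>
      if b < m then pvLoopB ma mb rest (some m) better (dom || (a == ma && b == mb))
      else pvLoopB ma mb rest (some b) (if ma + mb < a + b then better + 1 else better) dom
    | none => pvLoopB ma mb rest (some b) (if ma + mb < a + b then better + 1 else better) dom

-- Source B sorts the rows by key (-s[0], s[1]) and unpacks each row to (a, b); rows are length-2
-- under Pre_solution, so iterating the sorted pair images is exact on the admitted inputs.
def solution_alt (scores : List (List Int)) : Int :=
  match scores with
  | [] => 0   -- 'ma, mb = scores[0]' raises IndexError on []: excluded by Pre_solution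
  | r :: _ =>
    let me := pvPair r
    let ss := PySem.List.sorted (scores.map pvPair) (fun x => toLex (-x.1, x.2))
    let res := pvLoopB me.1 me.2 ss none 0 false
    if res.2 then -1 else res.1 + 1

-- ===== PRECONDITION & SPEC =====
-- Pre_solution excludes exactly the inputs on which A raises: the empty list (IndexError on
-- scores[0]), rows whose length is not 2 (ValueError/IndexError on unpacking), and any second
-- score above the hard-coded sentinel 100001, which makes A pop its stack empty (IndexError).
def Pre_solution (scores : List (List Int)) : Prop :=
  scores ≠ [] ∧ ∀ r ∈ scores, r.length = 2 ∧ r.getD 1 0 ≤ 100001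
instance (scores : List (List Int)) : Decidable (Pre_solution scores) := by unfold Pre_solution; infer_instance

def pvWitness_solution : List (List Int) := [[2, 2], [3, 1], [1, 3]]

def Spec_solution (scores : List (List Int)) (out : Int) : Prop := out = solution_alt scores
instance (scores : List (List Int)) (out : Int) : Decidable (Spec_solution scores out) := by unfold Spec_solution; infer_instance

-- ===== CLAIM (what is proved, stated in full; the proofs are below) =====
def Claim_equal_solution : Prop := ∀ (scores : List (List Int)), Dom_solution scores → Pre_solution scores → Spec_solution scores (solution scores)

-- ===== LEMMAS AND PROOFS =====

-- t is dominated by some element of l (both coordinates strictly larger)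
def pvBeatenB (l : List (Int × Int)) (t : Int × Int) : Bool :=
  l.any (fun s => decide (t.1 < s.1) && decide (t.2 < s.2))

-- the common closed form both ports are reduced to
def pvClosed (sc : List (Int × Int)) (me : Int × Int) : Int :=
  if pvBeatenB sc me then -1
  else (sc.countP (fun t => !pvBeatenB sc t && decide (me.1 + me.2 < t.1 + t.2)) : Int) + 1

-- sort order of A: ascending first score, ties descending second score
def pvR1 (x y : Int × Int) : Prop := x.1 < y.1 ∨ (x.1 = y.1 ∧ y.2 ≤ x.2)
-- sort order of B: descending first score, ties ascending second score
def pvR2 (x y : Int × Int) : Prop := y.1 < x.1 ∨ (x.1 = y.1 ∧ x.2 ≤ y.2)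

theorem pvBeatenB_iff (l : List (Int × Int)) (t : Int × Int) :
    pvBeatenB l t = true ↔ ∃ s ∈ l, t.1 < s.1 ∧ t.2 < s.2 := by
  simp [pvBeatenB]

theorem pvBeatenB_congr {l₁ l₂ : List (Int × Int)} (h : ∀ s, s ∈ l₁ ↔ s ∈ l₂) (t : Int × Int) :
    pvBeatenB l₁ t = pvBeatenB l₂ t := by
  have : (pvBeatenB l₁ t = true) ↔ (pvBeatenB l₂ t = true) := by
    rw [pvBeatenB_iff, pvBeatenB_iff]
    exact ⟨fun ⟨s, hs, hd⟩ => ⟨s, (h s).mp hs, hd⟩, fun ⟨s, hs, hd⟩ => ⟨s, (h s).mpr hs, hd⟩⟩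
  by_cases h₁ : pvBeatenB l₁ t = true
  · rw [h₁, Eq.comm, this.mp h₁]
  · rw [Bool.not_eq_true] at h₁
    rw [h₁, Eq.comm, Bool.eq_false_iff]
    exact fun h₂ => absurd (this.mpr h₂) (by simp [h₁])

theorem pvBeatenB_append_singleton (l : List (Int × Int)) (s t : Int × Int) :
    pvBeatenB (l ++ [s]) t = (pvBeatenB l t || (decide (t.1 < s.1) && decide (t.2 < s.2))) := by
  simp [pvBeatenB]

theorem pairwise_R1 (sc : List (Int × Int)) :
    (PySem.List.sorted sc (fun x => toLex (x.1, -x.2))).Pairwise pvR1 := by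
  refine (PySem.List.sorted_pairwise (κ := Lex (Int × Int)) sc (fun x => toLex (x.1, -x.2))).imp ?_
  intro a b h
  rw [Prod.Lex.le_iff] at h
  simp only [ofLex_toLex] at h
  rcases h with h1 | ⟨h1, h2⟩
  · exact Or.inl h1
  · exact Or.inr ⟨h1, by omega⟩

theorem pairwise_R2 (sc : List (Int × Int)) :
    (PySem.List.sorted sc (fun x => toLex (-x.1, x.2))).Pairwise pvR2 := by
  refine (PySem.List.sorted_pairwise (κ := Lex (Int × Int)) sc (fun x => toLex (-x.1, x.2))).imp ?_
  intro a b h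
  rw [Prod.Lex.le_iff] at h
  simp only [ofLex_toLex] at h
  rcases h with h1 | ⟨h1, h2⟩
  · exact Or.inl (by omega)
  · exact Or.inr ⟨by omega, h2⟩

theorem mem_foldl_add (l : List (Int × Int)) (rem : PySem.Set (Int × Int)) (t : Int × Int) :
    t ∈ l.foldl PySem.Set.add rem ↔ t ∈ rem ∨ t ∈ l := by
  induction l generalizing rem with
  | nil => simp
  | cons x xs ih =>
    rw [List.foldl_cons, ih]
    rw [PySem.Set.mem_add]
    simp only [List.mem_cons]
    tauto

theorem pvPop_eq (b : Int) (st : List (Int × Int)) (rem : PySem.Set (Int × Int)) :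
    pvPop b st rem =
      (st.dropWhile (fun t => decide (t.2 < b)),
       (st.takeWhile (fun t => decide (t.2 < b))).foldl PySem.Set.add rem) := by
  induction st generalizing rem with
  | nil => simp [pvPop]
  | cons x xs ih =>
    by_cases h : x.2 < b
    · simp [pvPop, h, List.dropWhile, List.takeWhile, ih]
    · simp [pvPop, h, List.dropWhile, List.takeWhile]

theorem takeWhile_eq_filter_of_mono (c : Int) (st : List (Int × Int))
    (h : st.Pairwise (fun x y => x.2 ≤ y.2)) :
    st.takeWhile (fun t => decide (t.2 < c)) = st.filter (fun t => decide (t.2 < c)) := by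
  induction st with
  | nil => rfl
  | cons x xs ih =>
    rcases List.pairwise_cons.mp h with ⟨hx, hxs⟩
    by_cases hc : x.2 < c
    · rw [List.takeWhile_cons_of_pos (by simpa using hc), List.filter_cons_of_pos (by simpa using hc), ih hxs]
    · rw [List.takeWhile_cons_of_neg (by simpa using hc), List.filter_cons_of_neg (by simpa using hc)]
      rw [Eq.comm, List.filter_eq_nil_iff.mpr]
      intro y hy
      simp only [decide_eq_true_eq]
      exact fun hyc => hc (lt_of_le_of_lt (hx y hy) hyc)

theorem dropWhile_not_of_mono (c : Int) (st : List (Int × Int))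
    (h : st.Pairwise (fun x y => x.2 ≤ y.2)) :
    ∀ x ∈ st.dropWhile (fun t => decide (t.2 < c)), ¬ x.2 < c := by
  induction st with
  | nil => simp
  | cons x xs ih =>
    rcases List.pairwise_cons.mp h with ⟨hx, hxs⟩
    by_cases hc : x.2 < c
    · simpa [List.dropWhile, hc] using ih hxs
    · intro y hy
      rw [List.dropWhile_cons_of_neg (by simpa using hc)] at hy
      rcases List.mem_cons.mp hy with rfl | hy
      · exact hc
      · exact fun hyc => hc (lt_of_le_of_lt ((List.pairwise_cons.mp h).1 y hy) hyc)

theorem takeWhile_append_sent (p : Int × Int → Bool) (st : List (Int × Int))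
    (sent : Int × Int) (h : p sent = false) :
    (st ++ [sent]).takeWhile p = st.takeWhile p ∧
    (st ++ [sent]).dropWhile p = st.dropWhile p ++ [sent] := by
  induction st with
  | nil => simp [List.takeWhile, List.dropWhile, h]
  | cons x xs ih =>
    by_cases hx : p x
    · rw [List.cons_append, List.takeWhile_cons_of_pos hx, List.takeWhile_cons_of_pos hx,
        List.dropWhile_cons_of_pos hx, List.dropWhile_cons_of_pos hx]
      exact ⟨by rw [ih.1], by rw [ih.2]⟩
    · rw [List.cons_append, List.takeWhile_cons_of_neg hx, List.takeWhile_cons_of_neg hx,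
        List.dropWhile_cons_of_neg hx, List.dropWhile_cons_of_neg hx]
      exact ⟨rfl, by rw [List.cons_append]⟩

-- the stack invariant of A's loop: rem collects exactly the already-dominated prefix elements
theorem pvLoopA_char (ss' : List (Int × Int)) :
    ∀ (P st : List (Int × Int)) (rem : PySem.Set (Int × Int)),
    (P ++ ss').Pairwise pvR1 →
    (∀ t ∈ ss', t.2 ≤ 100001) →
    (∀ t ∈ st, t ∈ P) →
    (∀ t, t ∈ rem ↔ (t ∈ P ∧ pvBeatenB P t = true)) →
    (∀ t ∈ st, pvBeatenB P t = false) →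
    (∀ t ∈ P, pvBeatenB P t = false → t ∈ st) →
    st.Pairwise (fun x y => x.2 ≤ y.2) →
    ∀ t, t ∈ pvLoopA ss' (st ++ [(-1, 100001)]) rem ↔ (t ∈ P ++ ss' ∧ pvBeatenB (P ++ ss') t = true) := by
  induction ss' with
  | nil =>
    intro P st rem hpw hb hstP hrem hstnd hcover hstpw t
    simpa [pvLoopA] using hrem t
  | cons s rest ih =>
    intro P st rem hpw hb hstP hrem hstnd hcover hstpw t
    have hs2 : s.2 ≤ 100001 := hb s (by simp)
    have hsent : (fun u : Int × Int => decide (u.2 < s.2)) (-1, 100001) = false := by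
      simp; omega
    obtain ⟨pwP, pwRest, cross⟩ := List.pairwise_append.mp hpw
    have hcrossS : ∀ u ∈ P, pvR1 u s := fun u hu => cross u hu s (by simp)
    have hlt : ∀ u ∈ P, u.2 < s.2 → u.1 < s.1 := by
      intro u hu h2
      rcases hcrossS u hu with h | ⟨_, h⟩
      · exact h
      · omega
    have htd := takeWhile_append_sent (fun u => decide (u.2 < s.2)) st (-1, 100001) hsent
    have htake := takeWhile_eq_filter_of_mono s.2 st hstpw
    have hdropn := dropWhile_not_of_mono s.2 st hstpw
    have hSnotdom : pvBeatenB (P ++ [s]) s = false := by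
      rw [Bool.eq_false_iff]
      intro hc
      obtain ⟨u, hu, h1, h2⟩ := (pvBeatenB_iff _ _).mp hc
      rcases List.mem_append.mp hu with huP | hus
      · rcases hcrossS u huP with h | ⟨h, _⟩ <;> omega
      · simp at hus; subst hus; omega
    -- one step of the loop
    have hstep : pvLoopA (s :: rest) (st ++ [(-1, 100001)]) rem =
        pvLoopA rest ((s :: st.dropWhile (fun u => decide (u.2 < s.2))) ++ [(-1, 100001)])
          ((st.takeWhile (fun u => decide (u.2 < s.2))).foldl PySem.Set.add rem) := by
      simp only [pvLoopA, pvPop_eq, htd.1, htd.2, List.cons_append]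
    rw [hstep]
    have hmain := ih (P ++ [s]) (s :: st.dropWhile (fun u => decide (u.2 < s.2)))
      ((st.takeWhile (fun u => decide (u.2 < s.2))).foldl PySem.Set.add rem)
      (by rw [List.append_assoc]; simpa using hpw)
      (fun u hu => hb u (by simp [hu]))
      (by
        intro u hu
        rcases List.mem_cons.mp hu with rfl | hu
        · exact List.mem_append_right _ (by simp)
        · exact List.mem_append_left _ (hstP u ((List.dropWhile_sublist _).subset hu)))
      (by
        intro u
        rw [mem_foldl_add, htake]
        constructor
        · rintro (hu | hu)
          · obtain ⟨huP, hd⟩ := (hrem u).mp hu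
            exact ⟨List.mem_append_left _ huP, by simp [pvBeatenB_append_singleton, hd]⟩
          · obtain ⟨hust, hup⟩ := List.mem_filter.mp hu
            have h2 : u.2 < s.2 := by simpa using hup
            have h1 : u.1 < s.1 := hlt u (hstP u hust) h2
            exact ⟨List.mem_append_left _ (hstP u hust),
              by simp [pvBeatenB_append_singleton, h1, h2]⟩
        · rintro ⟨hmem, hd⟩
          by_cases htp : u ∈ P
          · by_cases hdp : pvBeatenB P u = true
            · exact Or.inl ((hrem u).mpr ⟨htp, hdp⟩)
            · rw [pvBeatenB_append_singleton] at hd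
              rw [Bool.not_eq_true] at hdp
              rw [hdp, Bool.false_or, Bool.and_eq_true, decide_eq_true_eq, decide_eq_true_eq] at hd
              refine Or.inr (List.mem_filter.mpr ⟨hcover u htp hdp, by simp [hd.2]⟩)
          · have hus : u = s := by
              rcases List.mem_append.mp hmem with h | h
              · exact absurd h htp
              · simpa using h
            subst hus
            rw [hSnotdom] at hd
            exact absurd hd (by simp))
      (by
        intro u hu
        rcases List.mem_cons.mp hu with rfl | hu
        · exact hSnotdom
        · have hust := (List.dropWhile_sublist _).subset hu
          have h2 := hdropn u hu
          rw [pvBeatenB_append_singleton, hstnd u hust, Bool.false_or]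
          simp [h2])
      (by
        intro u hmem hd
        by_cases htp : u ∈ P
        · rw [pvBeatenB_append_singleton, Bool.or_eq_false_iff] at hd
          have hust := hcover u htp hd.1
          rw [← List.takeWhile_append_dropWhile (p := fun u : Int × Int => decide (u.2 < s.2)) (l := st)] at hust
          rcases List.mem_append.mp hust with h | h
          · rw [htake] at h
            obtain ⟨_, hup⟩ := List.mem_filter.mp h
            have h2 : u.2 < s.2 := by simpa using hup
            have h1 : u.1 < s.1 := hlt u htp h2
            rw [Bool.and_eq_false_iff] at hd
            rcases hd.2 with h' | h' <;> simp [h1, h2] at h'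
          · exact List.mem_cons_of_mem _ h
        · have hus : u = s := by
            rcases List.mem_append.mp hmem with h | h
            · exact absurd h htp
            · simpa using h
          subst hus
          exact List.mem_cons_self)
      (by
        refine List.pairwise_cons.mpr ⟨?_, List.Pairwise.sublist (List.dropWhile_sublist _) hstpw⟩
        intro u hu
        have := hdropn u hu
        omega)
    rw [hmain t, List.append_assoc, List.singleton_append]

-- the sweep invariant of B's loop
theorem pvLoopB_char (ma mb : Int) (ss2 : List (Int × Int)) (hpw : ss2.Pairwise pvR2) (ss' : List (Int × Int)) :
    ∀ (P : List (Int × Int)) (maxb : Option Int) (better : Int) (dom : Bool),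
    ss2 = P ++ ss' →
    (match maxb with
     | none => P = []
     | some m => (∀ t ∈ P, t.2 ≤ m) ∧ ∃ t ∈ P, t.2 = m) →
    pvLoopB ma mb ss' maxb better dom =
      (better + (ss'.countP (fun t => !pvBeatenB ss2 t && decide (ma + mb < t.1 + t.2)) : Int),
       dom || ss'.any (fun t => pvBeatenB ss2 t && (t == (ma, mb)))) := by
  induction ss' with
  | nil =>
    intro P maxb better dom hss hmax
    simp [pvLoopB]
  | cons s rest ih =>
    intro P maxb better dom hss hmax
    obtain ⟨a, b⟩ := s
    obtain ⟨pwP, pwRest, cross⟩ := List.pairwise_append.mp (hss ▸ hpw)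
    have hdomiff : pvBeatenB ss2 (a, b) = true ↔ ∃ u ∈ P, b < u.2 := by
      rw [pvBeatenB_iff]
      constructor
      · rintro ⟨u, hu, h1, h2⟩
        rw [hss] at hu
        rcases List.mem_append.mp hu with h | h
        · exact ⟨u, h, h2⟩
        · rcases List.mem_cons.mp h with rfl | h
          · simp at h1
          · rcases List.rel_of_pairwise_cons pwRest h with hc | ⟨hc, _⟩ <;>
              simp at h1 h2 hc <;> omega
      · rintro ⟨u, hu, h2⟩
        rcases cross u hu (a, b) (by simp) with h | ⟨h, h'⟩
        · exact ⟨u, by rw [hss]; exact List.mem_append_left _ hu, by simpa using h, h2⟩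
        · simp at h'; omega
    have hss' : ss2 = (P ++ [(a, b)]) ++ rest := by rw [hss, List.append_assoc, List.singleton_append]
    match maxb, hmax with
    | none, hP =>
      subst hP
      have hdom : pvBeatenB ss2 (a, b) = false := by
        rw [Bool.eq_false_iff]
        intro hc
        obtain ⟨u, hu, _⟩ := hdomiff.mp hc
        simp at hu
      rw [show pvLoopB ma mb ((a, b) :: rest) none better dom =
          pvLoopB ma mb rest (some b) (if ma + mb < a + b then better + 1 else better) dom from rfl]
      rw [ih ([] ++ [(a, b)]) (some b) (if ma + mb < a + b then better + 1 else better) dom hss' (by simp)]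
      simp only [List.countP_cons, List.any_cons, hdom, Bool.false_and,
        Bool.not_false, Bool.true_and]
      rw [Prod.mk.injEq]
      refine ⟨?_, by simp⟩
      simp only [decide_eq_true_eq]; split_ifs with h <;> push_cast <;> omega
    | some m, ⟨hub, u0, hu0, hu0b⟩ =>
      by_cases hbm : b < m
      · have hdom : pvBeatenB ss2 (a, b) = true := hdomiff.mpr ⟨u0, hu0, by omega⟩
        rw [show pvLoopB ma mb ((a, b) :: rest) (some m) better dom =
            pvLoopB ma mb rest (some m) better (dom || (a == ma && b == mb)) from by
          simp [pvLoopB, hbm]]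
        rw [ih (P ++ [(a, b)]) (some m) better (dom || (a == ma && b == mb)) hss'
          (by
            refine ⟨?_, u0, List.mem_append_left _ hu0, hu0b⟩
            intro u hu
            rcases List.mem_append.mp hu with h | h
            · exact hub u h
            · simp at h; subst h; simp; omega)]
        simp only [List.countP_cons, List.any_cons, hdom, Bool.not_true, Bool.false_and,
          Bool.true_and, Bool.or_assoc]
        rw [Prod.mk.injEq]
        exact ⟨by simp, rfl⟩
      · have hdom : pvBeatenB ss2 (a, b) = false := by
          rw [Bool.eq_false_iff]
          intro hc
          obtain ⟨u, hu, h2⟩ := hdomiff.mp hc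
          have := hub u hu
          omega
        rw [show pvLoopB ma mb ((a, b) :: rest) (some m) better dom =
            pvLoopB ma mb rest (some b) (if ma + mb < a + b then better + 1 else better) dom from by
          simp [pvLoopB, hbm]]
        rw [ih (P ++ [(a, b)]) (some b) (if ma + mb < a + b then better + 1 else better) dom hss'
          (by
            refine ⟨?_, (a, b), List.mem_append_right _ (by simp), rfl⟩
            intro u hu
            rcases List.mem_append.mp hu with h | h
            · have := hub u h; omega
            · simp at h; subst h; simp)]
        simp only [List.countP_cons, List.any_cons, hdom, Bool.false_and,
          Bool.not_false, Bool.true_and]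
        rw [Prod.mk.injEq]
        refine ⟨?_, by simp⟩
        simp only [decide_eq_true_eq]; split_ifs with h <;> push_cast <;> omega

theorem countP_split {α : Type} (l : List α) (p q : α → Bool) :
    l.countP p = l.countP (fun a => p a && q a) + l.countP (fun a => p a && !q a) := by
  induction l with
  | nil => simp
  | cons x xs ih =>
    by_cases hp : p x <;> by_cases hq : q x <;>
      simp [hp, hq, ih] <;> omega

theorem countP_of_bisect (xs : List Int) (x : Int) (k : Nat) (hk : k ≤ xs.length)
    (h1 : ∀ (j : Nat) (hj : j < xs.length), j < k → xs[j] ≤ x)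
    (h2 : ∀ (j : Nat) (hj : j < xs.length), k ≤ j → x < xs[j]) :
    xs.countP (fun y => decide (y ≤ x)) = k := by
  induction xs generalizing k with
  | nil => simp at hk ⊢; omega
  | cons a t ih =>
    cases k with
    | zero =>
      rw [List.countP_eq_zero]
      intro y hy
      simp only [decide_eq_true_eq, not_le]
      obtain ⟨j, hj, rfl⟩ := List.getElem_of_mem hy
      exact h2 j hj (Nat.zero_le _)
    | succ k =>
      have ha : a ≤ x := h1 0 (by simp) (by omega)
      rw [List.countP_cons]
      have := ih k (by simpa using hk)
        (fun j hj hjk => h1 (j+1) (by simpa using hj) (by omega))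
        (fun j hj hjk => h2 (j+1) (by simpa using hj) (by omega))
      simp [this, ha]

-- rows of length 2 are literal pairs
theorem len2_pair (r : List Int) (h : r.length = 2) : ∃ a b, r = [a, b] := by
  match r, h with
  | [a, b], _ => exact ⟨a, b, rfl⟩

-- A reduced to the closed form
theorem solution_closed (scores : List (List Int)) (hne : scores ≠ [])
    (hrows : ∀ r ∈ scores, r.length = 2 ∧ r.getD 1 0 ≤ 100001) :
    solution scores = pvClosed (scores.map pvPair) (pvPair (scores.headD [])) := by
  obtain ⟨r, rs, rfl⟩ := List.exists_cons_of_ne_nil hne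
  set sc : List (Int × Int) := (r :: rs).map pvPair with hsc
  set me : Int × Int := pvPair r with hme
  set ss : List (Int × Int) := PySem.List.sorted sc (fun x => toLex (x.1, -x.2)) with hss
  have hmemss : ∀ x, x ∈ ss ↔ x ∈ sc := fun x => PySem.List.mem_sorted sc _ _ x
  have hperm : ss.Perm sc := PySem.List.sorted_perm sc _ _
  have hb : ∀ t ∈ ss, t.2 ≤ 100001 := by
    intro t ht
    obtain ⟨r', hr', rfl⟩ := List.mem_map.mp ((hmemss t).mp ht)
    obtain ⟨hlen, hbd⟩ := hrows r' hr'
    obtain ⟨a, b, rfl⟩ := len2_pair r' hlen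
    simpa [pvPair] using hbd
  have hrem := pvLoopA_char ss [] [] PySem.Set.empty
    (by simpa using pairwise_R1 sc) hb (by simp)
    (by intro t; simp [PySem.Set.empty]) (by simp) (by simp) (by simp)
  simp only [List.nil_append] at hrem
  set rem : PySem.Set (Int × Int) := pvLoopA ss [(-1, 100001)] PySem.Set.empty with hremdef
  have hmesc : me ∈ sc := by rw [hsc, hme, List.map_cons]; exact List.mem_cons_self
  have hdomc : ∀ t, pvBeatenB ss t = pvBeatenB sc t := fun t => pvBeatenB_congr hmemss t
  have hcont : ∀ t ∈ sc, PySem.Set.contains rem t = pvBeatenB sc t := by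
    intro t ht
    by_cases hd : pvBeatenB sc t = true
    · rw [hd, (PySem.Set.contains_iff rem t).mpr ((hrem t).mpr ⟨(hmemss t).mpr ht, (hdomc t).trans hd⟩)]
    · rw [Bool.not_eq_true] at hd
      rw [hd, Bool.eq_false_iff]
      intro hc
      have := ((hrem t).mp ((PySem.Set.contains_iff rem t).mp hc)).2
      rw [hdomc t, hd] at this
      exact Bool.false_ne_true this
  have hsol : solution (r :: rs) =
      (if PySem.Set.contains rem me then (-1 : Int)
       else
        (PySem.List.sorted ((ss.filter (fun t => !PySem.Set.contains rem t)).map (fun t => t.1 + t.2)) (fun x => x)).length -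
          (PySem.List.bisectRight (PySem.List.sorted ((ss.filter (fun t => !PySem.Set.contains rem t)).map (fun t => t.1 + t.2)) (fun x => x)) (me.1 + me.2) : Int) + 1) := by
    rw [solution]
    rfl
  rw [hsol, pvClosed, hcont me hmesc]
  simp only [List.headD_cons, ← hme]
  by_cases hd : pvBeatenB sc me = true
  · rw [hd]; simp
  · rw [Bool.not_eq_true] at hd
    rw [hd]
    simp only [if_false, Bool.false_eq_true]
    -- the survivors and their sums
    have hfc : ss.filter (fun t => !PySem.Set.contains rem t) = ss.filter (fun t => !pvBeatenB sc t) :=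
      List.filter_congr (fun t ht => by rw [hcont t ((hmemss t).mp ht)])
    rw [hfc]
    set L : List (Int × Int) := ss.filter (fun t => !pvBeatenB sc t) with hL
    set insen : List Int := PySem.List.sorted (L.map (fun t => t.1 + t.2)) (fun x => x) with hinsen
    have hpwi : insen.Pairwise (fun a b : Int => a ≤ b) := by
      simpa using PySem.List.sorted_pairwise (κ := Int) (L.map (fun t => t.1 + t.2)) (fun x => x)
    obtain ⟨hk1, hk2, hk3⟩ := PySem.List.bisectRight_spec insen (me.1 + me.2) hpwi
    have hrank : PySem.List.bisectRight insen (me.1 + me.2) =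
        insen.countP (fun y => decide (y ≤ me.1 + me.2)) :=
      (countP_of_bisect insen (me.1 + me.2) _ hk1 hk2 hk3).symm
    have hpermi : insen.Perm (L.map (fun t => t.1 + t.2)) := PySem.List.sorted_perm _ _ _
    have hcount : insen.countP (fun y => decide (y ≤ me.1 + me.2)) =
        sc.countP (fun t => !pvBeatenB sc t && decide (t.1 + t.2 ≤ me.1 + me.2)) := by
      rw [hpermi.countP_eq, List.countP_map, hL, List.countP_filter, ← hperm.countP_eq]
      exact List.countP_congr (fun t _ => by simp [Function.comp, Bool.and_comm])
    have hlen : insen.length = sc.countP (fun t => !pvBeatenB sc t) := by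
      rw [hinsen, PySem.List.length_sorted, List.length_map, hL,
        ← List.countP_eq_length_filter, ← hperm.countP_eq]
    have hsplit := countP_split sc (fun t => !pvBeatenB sc t) (fun t => decide (t.1 + t.2 ≤ me.1 + me.2))
    have hneg : sc.countP (fun t => !pvBeatenB sc t && !decide (t.1 + t.2 ≤ me.1 + me.2)) =
        sc.countP (fun t => !pvBeatenB sc t && decide (me.1 + me.2 < t.1 + t.2)) :=
      List.countP_congr (fun t _ => by
        by_cases h : t.1 + t.2 ≤ me.1 + me.2
        · simp [h]
        · simp [h]; omega)
    rw [hrank, hcount, hlen]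
    rw [hneg] at hsplit
    omega

-- B reduced to the closed form
theorem solution_alt_closed (scores : List (List Int)) (hne : scores ≠ []) :
    solution_alt scores = pvClosed (scores.map pvPair) (pvPair (scores.headD [])) := by
  obtain ⟨r, rs, rfl⟩ := List.exists_cons_of_ne_nil hne
  set sc : List (Int × Int) := (r :: rs).map pvPair with hsc
  set me : Int × Int := pvPair r with hme
  set ss : List (Int × Int) := PySem.List.sorted sc (fun x => toLex (-x.1, x.2)) with hss
  have hmemss : ∀ x, x ∈ ss ↔ x ∈ sc := fun x => PySem.List.mem_sorted sc _ _ x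
  have hperm : ss.Perm sc := PySem.List.sorted_perm sc _ _
  have hdomc : ∀ t, pvBeatenB ss t = pvBeatenB sc t := fun t => pvBeatenB_congr hmemss t
  have hmesc : me ∈ sc := by rw [hsc, hme, List.map_cons]; exact List.mem_cons_self
  have hres := pvLoopB_char me.1 me.2 ss (pairwise_R2 sc) ss [] none 0 false (by simp) rfl
  have hany : ss.any (fun t => pvBeatenB ss t && (t == me)) = pvBeatenB sc me := by
    by_cases hd : pvBeatenB sc me = true
    · rw [hd, List.any_eq_true]
      exact ⟨me, (hmemss me).mpr hmesc, by rw [hdomc me, hd]; simp⟩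
    · rw [Bool.not_eq_true] at hd
      rw [hd, Bool.eq_false_iff]
      intro hc
      obtain ⟨t, ht, hck⟩ := List.any_eq_true.mp hc
      rw [Bool.and_eq_true, beq_iff_eq] at hck
      obtain ⟨hck, heq⟩ := hck
      rw [heq, hdomc me, hd] at hck
      exact Bool.false_ne_true hck
  have hcnt : ss.countP (fun t => !pvBeatenB ss t && decide (me.1 + me.2 < t.1 + t.2)) =
      sc.countP (fun t => !pvBeatenB sc t && decide (me.1 + me.2 < t.1 + t.2)) := by
    rw [hperm.countP_eq]
    exact List.countP_congr (fun t ht => by rw [hdomc t])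
  have hsol : solution_alt (r :: rs) =
      (if (pvLoopB me.1 me.2 ss none 0 false).2 then (-1 : Int)
       else (pvLoopB me.1 me.2 ss none 0 false).1 + 1) := by
    rw [solution_alt]
  have hany' : (ss.any fun t => pvBeatenB ss t && (t == (me.1, me.2))) = pvBeatenB sc me := by
    simpa using hany
  rw [hsol, hres, pvClosed, hcnt]
  simp only [List.headD_cons, ← hme]
  rw [Bool.false_or, hany']
  by_cases hd : pvBeatenB sc me = true
  · rw [hd]; simp
  · rw [Bool.not_eq_true] at hd
    rw [hd]
    simp

-- ===== VERDICT (by name: the statement is the Claim_ definition above) =====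
theorem solution_spec : Claim_equal_solution := by
  intro scores _ hpre
  obtain ⟨hne, hrows⟩ := hpre
  unfold Spec_solution
  rw [solution_closed scores hne hrows, solution_alt_closed scores hne]
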